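-- pv_equiv track=rewrite | github.com/Jv131103/estudos_python | estudos2/remover_pares.py | remover_pares_inplace_compact
-- ===== SOURCE A (Python) =====
-- def remover_pares_inplace_compact(lista):
--     write = 0  # onde vou escrever o próximo ímpar
--
--     for read in range(len(lista)):
--         if lista[read] % 2 != 0:
--             lista[write] = lista[read]
--             write += 1
--
--     # corta o “resto” que sobrou
--     del lista[write:]
--
--     return lista
-- ===== SOURCE B (Python) =====
-- def remover_pares_inplace_compact(lista):
--     lista[:] = [x for x in lista if x % 2 != 0]
--     return lista
-- ===== Notes on version B (the rewrite author's own statement) =====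
-- stated objective: simpler
-- what changed: Replaces the two-pointer read/write compaction and tail deletion with a single filter comprehension bulk-assigned back via slice assignment (same in-place mutation of the caller's list).
import Mathlib
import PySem

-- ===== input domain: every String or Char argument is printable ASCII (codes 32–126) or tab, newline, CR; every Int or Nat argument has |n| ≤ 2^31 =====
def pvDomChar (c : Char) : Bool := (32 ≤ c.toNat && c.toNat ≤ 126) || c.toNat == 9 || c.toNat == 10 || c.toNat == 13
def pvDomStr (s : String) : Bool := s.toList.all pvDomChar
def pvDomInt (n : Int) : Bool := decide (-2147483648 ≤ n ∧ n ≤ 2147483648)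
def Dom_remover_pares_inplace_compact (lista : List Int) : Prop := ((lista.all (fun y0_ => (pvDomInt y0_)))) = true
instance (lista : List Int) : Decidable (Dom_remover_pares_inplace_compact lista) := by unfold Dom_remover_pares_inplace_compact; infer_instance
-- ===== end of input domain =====

-- B replaces A's two-pointer in-place compaction with a single filter; this proves equality
-- of the RETURN values (both Pythons also mutate the argument list to the same contents).


-- ===== PORT A =====
-- one iteration of A's for-loop: state = (current list contents, write pointer)
def pvStepA (st : List Int × Nat) (read : Nat) : List Int × Nat :=
  if PySem.Int.mod (st.1.getD read 0) 2 ≠ 0 then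
    (st.1.set st.2 (st.1.getD read 0), st.2 + 1)
  else st

def remover_pares_inplace_compact (lista : List Int) : List Int :=
  let st := (List.range lista.length).foldl pvStepA (lista, 0)
  st.1.take st.2  -- del lista[write:]

-- ===== PORT B =====
def remover_pares_inplace_compact_alt (lista : List Int) : List Int :=
  lista.filter (fun x => PySem.Int.mod x 2 != 0)

-- ===== PRECONDITION & SPEC =====
def Spec_remover_pares_inplace_compact (lista : List Int) (out : List Int) : Prop := out = remover_pares_inplace_compact_alt lista
instance (lista : List Int) (out : List Int) : Decidable (Spec_remover_pares_inplace_compact lista out) := by unfold Spec_remover_pares_inplace_compact; infer_instance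

-- ===== CLAIM (what is proved, stated in full; the proofs are below) =====
def Claim_equal_remover_pares_inplace_compact : Prop := ∀ (lista : List Int), Dom_remover_pares_inplace_compact lista → Spec_remover_pares_inplace_compact lista (remover_pares_inplace_compact lista)

-- ===== LEMMAS AND PROOFS =====

-- Invariant: after processing reads 0..k-1, the list is
--   (odd elements of lista[:k]) ++ junk ++ lista[k:], and write = #odds, #odds + #junk = k.
lemma pv_loop_inv (lista : List Int) (k : Nat) (hk : k ≤ lista.length) :
    ∃ J : List Int,
      (List.range k).foldl pvStepA (lista, 0) =
        ((lista.take k).filter (fun x => PySem.Int.mod x 2 != 0) ++ J ++ lista.drop k,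
         ((lista.take k).filter (fun x => PySem.Int.mod x 2 != 0)).length)
      ∧ ((lista.take k).filter (fun x => PySem.Int.mod x 2 != 0)).length + J.length = k := by
  induction k with
  | zero => exact ⟨[], by simp⟩
  | succ k ih =>
    obtain ⟨J, hst, hlen⟩ := ih (Nat.le_of_succ_le hk)
    have hklt : k < lista.length := hk
    set p : Int → Bool := (fun x => PySem.Int.mod x 2 != 0) with hp
    set F := (lista.take k).filter p with hF
    have hdrop : lista.drop k = lista[k] :: lista.drop (k+1) :=
      List.drop_eq_getElem_cons hklt
    have htake : lista.take (k+1) = lista.take k ++ [lista[k]] :=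
      List.take_succ_eq_append_getElem hklt
    have hget : (F ++ J ++ lista.drop k).getD k 0 = lista[k] := by
      have h1 : ((F ++ J) ++ lista.drop k).getD k 0 = (lista.drop k).getD (k - (F ++ J).length) 0 :=
        List.getD_append_right (F ++ J) (lista.drop k) 0 k (by simp; omega)
      have h2 : (F ++ J).length = k := by simp; omega
      rw [h1, h2, Nat.sub_self, hdrop]; rfl
    rw [List.range_succ, List.foldl_append, hst]
    simp only [List.foldl_cons, List.foldl_nil, pvStepA, hget]
    by_cases hpx : p lista[k] = true
    · have hcond : (PySem.Int.mod lista[k] 2 ≠ 0) := by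
        simpa [hp] using hpx
      rw [if_pos hcond]
      have hFnew : (lista.take (k+1)).filter p = F ++ [lista[k]] := by
        rw [htake, List.filter_append]; simp [hpx, hF]
      have hset : (F ++ J ++ lista.drop k).set F.length lista[k]
          = F ++ (J ++ lista.drop k).set 0 lista[k] := by
        rw [List.append_assoc]
        rw [List.set_append_right _ _ (le_refl F.length), Nat.sub_self]
      cases J with
      | nil =>
        refine ⟨[], ?_, ?_⟩
        · rw [hset, hFnew]
          simp only [List.nil_append, hdrop, List.set_cons_zero]
          simp
        · rw [hFnew]; simp at hlen ⊢; omega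
      | cons j J1 =>
        refine ⟨J1 ++ [lista[k]], ?_, ?_⟩
        · rw [hset, hdrop, hFnew]
          simp
        · rw [hFnew]; simp at hlen ⊢; omega
    · have hcond : ¬ (PySem.Int.mod lista[k] 2 ≠ 0) := by
        simp [hp] at hpx; simpa using hpx
      rw [if_neg hcond]
      have hFnew : (lista.take (k+1)).filter p = F := by
        rw [htake, List.filter_append]; simp [hpx, hF]
      refine ⟨J ++ [lista[k]], ?_, ?_⟩
      · rw [hFnew, hdrop]; simp
      · rw [hFnew]; simp at hlen ⊢; omega

-- ===== VERDICT (by name: the statement is the Claim_ definition above) =====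
theorem remover_pares_inplace_compact_spec : Claim_equal_remover_pares_inplace_compact := by
  intro lista _
  unfold Spec_remover_pares_inplace_compact remover_pares_inplace_compact remover_pares_inplace_compact_alt
  obtain ⟨J, hst, -⟩ := pv_loop_inv lista lista.length (le_refl _)
  rw [hst]
  simp only [List.drop_length, List.append_nil, List.take_length]
  exact List.take_left
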